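-- pv_equiv track=rewrite | github.com/rnqhscjf3333/Programmers | Level2/n^2 배열 자르기.py | solution
-- ===== SOURCE A (Python) =====
-- def solution(n, left, right):
--     answer = []
--
--     t = left//n
--     t1 = right//n
--
--     for a in range(t,t1+1):
--         for b in range(n):
--             if a <= b:
--                 answer.append(b+1)
--             else:
--                 answer.append(a+1)
--
--
--
--     return answer[left-t*n:right-t*n+1]
-- ===== SOURCE B (Python) =====
-- def solution(n, left, right):
--     return [max(i // n, i % n) + 1 for i in range(left, right + 1)]
-- ===== Notes on version B (the rewrite author's own statement) =====
-- stated objective: simpler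
-- what changed: B replaces A's two nested loops that materialise every full row from left//n to right//n and then slice, by a single pass computing each requested cell directly as max(i//n, i%n)+1 for i in [left, right].
-- outside the precondition, e.g. on solution(-2, 0, 1): A returns [], B returns [1, 0]
import Mathlib
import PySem

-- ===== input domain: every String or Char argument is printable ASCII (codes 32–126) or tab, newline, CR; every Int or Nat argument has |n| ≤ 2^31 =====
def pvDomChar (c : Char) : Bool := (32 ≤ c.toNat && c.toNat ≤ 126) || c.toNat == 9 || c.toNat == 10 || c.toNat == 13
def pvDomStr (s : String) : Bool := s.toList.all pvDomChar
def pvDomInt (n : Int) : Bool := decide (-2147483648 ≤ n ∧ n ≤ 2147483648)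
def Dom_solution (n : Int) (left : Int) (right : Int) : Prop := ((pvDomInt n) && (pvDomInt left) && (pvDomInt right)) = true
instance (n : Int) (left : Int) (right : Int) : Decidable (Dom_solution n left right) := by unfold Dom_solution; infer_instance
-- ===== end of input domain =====

-- B computes each requested cell directly as max(i//n, i%n)+1 in one pass over [left, right],
-- instead of materialising all full rows left//n .. right//n and slicing (objective: simpler).


-- ===== PORT A =====
def solution (n : Int) (left : Int) (right : Int) : List Int :=
  let t := PySem.Int.floordiv left n
  let t1 := PySem.Int.floordiv right n
  let answer : List Int :=
    (PySem.List.pyRange t (t1 + 1) 1).foldl (fun answer a =>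
      (PySem.List.pyRange 0 n 1).foldl (fun answer b =>
        if a ≤ b then answer ++ [b + 1] else answer ++ [a + 1]) answer) []
  PySem.List.slice answer (some (left - t * n)) (some (right - t * n + 1))

-- ===== PORT B =====
def solution_alt (n : Int) (left : Int) (right : Int) : List Int :=
  (PySem.List.pyRange left (right + 1) 1).map
    (fun i => max (PySem.Int.floordiv i n) (PySem.Int.mod i n) + 1)

-- ===== PRECONDITION & SPEC =====
-- Pre_ restricts to the problem's natural domain (n is the side length of the n×n grid, so 1 ≤ n):
-- for n = 0 A raises ZeroDivisionError, and n < 0 is outside the natural domain (there A's empty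
-- result is an accident of range(n) being empty, while B computes cell values).
def Pre_solution (n : Int) (left : Int) (right : Int) : Prop := 1 ≤ n
instance (n : Int) (left : Int) (right : Int) : Decidable (Pre_solution n left right) := by
  unfold Pre_solution; infer_instance

def pvWitness_solution : Int × Int × Int := (3, 2, 5)

def Spec_solution (n : Int) (left : Int) (right : Int) (out : List Int) : Prop := out = solution_alt n left right
instance (n : Int) (left : Int) (right : Int) (out : List Int) : Decidable (Spec_solution n left right out) := by unfold Spec_solution; infer_instance

-- ===== CLAIM (what is proved, stated in full; the proofs are below) =====
def Claim_equal_solution : Prop := ∀ (n : Int) (left : Int) (right : Int), Dom_solution n left right → Pre_solution n left right → Spec_solution n left right (solution n left right)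

-- ===== LEMMAS AND PROOFS =====

-- the cell value B computes, named for the lemmas below
def pvCell (n i : Int) : Int := max (PySem.Int.floordiv i n) (PySem.Int.mod i n) + 1

lemma pvCell_at (n a k : Int) (hn : 0 < n) (hk0 : 0 ≤ k) (hkn : k < n) :
    pvCell n (a * n + k) = if a ≤ k then k + 1 else a + 1 := by
  have hd : PySem.Int.floordiv (a * n + k) n = a := by
    rw [PySem.Int.floordiv_eq_iff_of_pos hn]
    constructor <;> nlinarith
  have hm : PySem.Int.mod (a * n + k) n = k := by
    have := PySem.Int.floordiv_mul_add_mod (a * n + k) n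
    rw [hd] at this; omega
  unfold pvCell
  rw [hd, hm]
  split <;> omega

-- dropping/taking a unit-step range
lemma drop_pyRange (p : Nat) : ∀ (L M : Int),
    (PySem.List.pyRange L M 1).drop p = PySem.List.pyRange (L + p) M 1 := by
  induction p with
  | zero => intro L M; simp
  | succ p ih =>
    intro L M
    by_cases h : L < M
    · rw [PySem.List.pyRange_one_cons h, List.drop_succ_cons, ih]
      congr 1; push_cast; ring
    · rw [PySem.List.pyRange_one_eq_nil (by omega), PySem.List.pyRange_one_eq_nil (by omega)]
      simp

lemma take_pyRange (q : Nat) : ∀ (L M : Int),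
    (PySem.List.pyRange L M 1).take q = PySem.List.pyRange L (min (L + q) M) 1 := by
  induction q with
  | zero => intro L M; simp
  | succ q ih =>
    intro L M
    by_cases h : L < M
    · rw [PySem.List.pyRange_one_cons h, List.take_succ_cons, ih,
        PySem.List.pyRange_one_cons (show L < min (L + (q+1:Nat)) M by push_cast; omega)]
      congr 2; push_cast; omega
    · rw [PySem.List.pyRange_one_eq_nil (by omega),
        PySem.List.pyRange_one_eq_nil (show min (L + (q+1:Nat)) M ≤ L by omega)]
      simp

-- A's inner loop appends one full row: the cells a*n .. a*n+n-1
lemma inner_row (n a : Int) (hn : 0 < n) (acc : List Int) :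
    (PySem.List.pyRange 0 n 1).foldl (fun ans b =>
        if a ≤ b then ans ++ [b + 1] else ans ++ [a + 1]) acc
    = acc ++ (PySem.List.pyRange (a * n) (a * n + n) 1).map (pvCell n) := by
  have hfun : (fun (ans : List Int) b => if a ≤ b then ans ++ [b + 1] else ans ++ [a + 1])
      = fun ans b => ans ++ [if a ≤ b then b + 1 else a + 1] := by
    funext ans b; split <;> rfl
  rw [hfun, PySem.List.foldl_append_singleton_eq_map]
  congr 1
  rw [PySem.List.pyRange_one (a*n) (a*n+n), PySem.List.pyRange_one 0 n]
  have h1 : (a * n + n - a * n).toNat = (n - 0).toNat := by omega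
  rw [h1, List.map_map, List.map_map]
  apply List.map_congr_left
  intro k hk
  simp only [List.mem_range] at hk
  have hkn : (k : Int) < n := by omega
  simp only [Function.comp]
  rw [pvCell_at n a k hn (by omega) hkn]
  simp

-- A's outer loop over k rows starting at row a
lemma outer_rows (n : Int) (hn : 0 < n) : ∀ (k : Nat) (a : Int) (acc : List Int),
    (PySem.List.pyRange a (a + k) 1).foldl (fun ans r =>
      (PySem.List.pyRange 0 n 1).foldl (fun ans b =>
        if r ≤ b then ans ++ [b + 1] else ans ++ [r + 1]) ans) acc
    = acc ++ (PySem.List.pyRange (a * n) ((a + k) * n) 1).map (pvCell n) := by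
  intro k
  induction k with
  | zero =>
    intro a acc
    rw [PySem.List.pyRange_one_eq_nil (show a + ((0:Nat):Int) ≤ a by simp),
      PySem.List.pyRange_one_eq_nil (show (a + ((0:Nat):Int)) * n ≤ a * n by simp)]
    simp
  | succ k ih =>
    intro a acc
    rw [PySem.List.pyRange_one_cons (show a < a + (((k:Nat)+1 : Nat):Int) by push_cast; omega),
      List.foldl_cons, inner_row n a hn,
      show a + (((k+1:Nat)):Int) = (a+1) + ((k:Nat):Int) by push_cast; ring_nf, ih (a+1),
      PySem.List.pyRange_one_append (a*n) (a*n+n) ((a+1+k)*n) (by nlinarith) (by push_cast; nlinarith)]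
    simp [show a*n+n = (a+1)*n by ring]

-- the whole double loop builds the cells t*n .. (t1+1)*n - 1
lemma answer_eq (n t t1 : Int) (hn : 0 < n) :
    (PySem.List.pyRange t (t1 + 1) 1).foldl (fun ans r =>
      (PySem.List.pyRange 0 n 1).foldl (fun ans b =>
        if r ≤ b then ans ++ [b + 1] else ans ++ [r + 1]) ans) []
    = (PySem.List.pyRange (t * n) ((t1 + 1) * n) 1).map (pvCell n) := by
  by_cases h : t ≤ t1 + 1
  · have hk : t1 + 1 = t + ((t1 + 1 - t).toNat : Int) := by omega
    rw [hk, outer_rows n hn (t1+1-t).toNat t []]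
    simp
  · rw [PySem.List.pyRange_one_eq_nil (show t1 + 1 ≤ t by omega),
      PySem.List.pyRange_one_eq_nil (show (t1 + 1) * n ≤ t * n by nlinarith)]
    simp

-- ===== VERDICT (by name: the statement is the Claim_ definition above) =====
theorem solution_spec : Claim_equal_solution := by
  intro n left right _ hp
  have hn' : 0 < n := hp
  unfold Spec_solution solution solution_alt
  show _ = (PySem.List.pyRange left (right + 1) 1).map (pvCell n)
  set t := PySem.Int.floordiv left n with hT
  set t1 := PySem.Int.floordiv right n with hT1
  have hL : t * n ≤ left ∧ left < (t + 1) * n :=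
    (PySem.Int.floordiv_eq_iff_of_pos hn').mp hT.symm
  have hR : t1 * n ≤ right ∧ right < (t1 + 1) * n :=
    (PySem.Int.floordiv_eq_iff_of_pos hn').mp hT1.symm
  have e1 : (t + 1) * n = t * n + n := by ring
  have e2 : (t1 + 1) * n = t1 * n + n := by ring
  simp only []
  rw [answer_eq n t t1 hn']
  by_cases hmono : t ≤ t1
  · have hts : t * n ≤ t1 * n := by nlinarith
    have h0b : 0 ≤ right - t * n + 1 := by omega
    rw [PySem.List.slice_toNat _ (show (0:Int) ≤ left - t * n by omega)
        (show (0:Int) ≤ right - t * n + 1 by omega), ← List.map_drop, drop_pyRange, ← List.map_take,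
      take_pyRange]
    by_cases hlr : left ≤ right
    · congr 2 <;> omega
    · rw [PySem.List.pyRange_one_eq_nil (by omega : min (t * n + ((left - t * n).toNat : Int) + (((right - t * n + 1).toNat - (left - t * n).toNat : Nat) : Int)) ((t1 + 1) * n) ≤ t * n + ((left - t * n).toNat : Int)),
        PySem.List.pyRange_one_eq_nil (by omega : right + 1 ≤ left)]
  · -- t1 < t: the built list and the requested span are both empty
    have hts : (t1 + 1) * n ≤ t * n := by nlinarith
    rw [PySem.List.pyRange_one_eq_nil hts]
    have hrl : right + 1 ≤ left := by omega
    rw [PySem.List.pyRange_one_eq_nil hrl]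
    simp [PySem.List.slice]
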